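-- pv_equiv track=rewrite | github.com/marcoculver/adsb-logger | flight_charts/wind_chart.py | _insert_breaks
-- ===== SOURCE A (Python) =====
-- def _insert_breaks(x, y, threshold=180):
--     """Insert None values at discontinuities to break the line."""
--     x = list(x)
--     y = list(y)
--
--     new_x = []
--     new_y = []
--
--     for i in range(len(y)):
--         new_x.append(x[i])
--         new_y.append(y[i])
--
--         if i < len(y) - 1:
--             # Check for discontinuity
--             if y[i] is not None and y[i+1] is not None:
--                 diff = abs(float(y[i+1]) - float(y[i]))
--                 if diff > threshold:
--                     new_x.append(None)
--                     new_y.append(None)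
--
--     return new_x, new_y
-- ===== SOURCE B (Python) =====
-- def _insert_breaks(x, y, threshold=180):
--     """Insert None values at discontinuities to break the line.
--
--     Two phases: find break positions, then assemble the segments between them.
--     """
--     x = list(x)
--     y = list(y)
--     n = len(y)
--
--     breaks = [i for i in range(n - 1)
--               if y[i] is not None and y[i + 1] is not None
--               and abs(float(y[i + 1]) - float(y[i])) > threshold]
--
--     new_x = []
--     new_y = []
--     start = 0
--     for b in breaks:
--         new_x.extend(x[i] for i in range(start, b + 1))
--         new_y.extend(y[i] for i in range(start, b + 1))
--         new_x.append(None)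
--         new_y.append(None)
--         start = b + 1
--     new_x.extend(x[i] for i in range(start, n))
--     new_y.extend(y[i] for i in range(start, n))
--     return new_x, new_y
-- ===== Notes on version B (the rewrite author's own statement) =====
-- stated objective: alternative
-- what changed: A appends point-by-point inserting None inline after each large jump; B first collects the list of break indices, then assembles the output by concatenating the slices between consecutive breaks with (None, None) separators.
import Mathlib
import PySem

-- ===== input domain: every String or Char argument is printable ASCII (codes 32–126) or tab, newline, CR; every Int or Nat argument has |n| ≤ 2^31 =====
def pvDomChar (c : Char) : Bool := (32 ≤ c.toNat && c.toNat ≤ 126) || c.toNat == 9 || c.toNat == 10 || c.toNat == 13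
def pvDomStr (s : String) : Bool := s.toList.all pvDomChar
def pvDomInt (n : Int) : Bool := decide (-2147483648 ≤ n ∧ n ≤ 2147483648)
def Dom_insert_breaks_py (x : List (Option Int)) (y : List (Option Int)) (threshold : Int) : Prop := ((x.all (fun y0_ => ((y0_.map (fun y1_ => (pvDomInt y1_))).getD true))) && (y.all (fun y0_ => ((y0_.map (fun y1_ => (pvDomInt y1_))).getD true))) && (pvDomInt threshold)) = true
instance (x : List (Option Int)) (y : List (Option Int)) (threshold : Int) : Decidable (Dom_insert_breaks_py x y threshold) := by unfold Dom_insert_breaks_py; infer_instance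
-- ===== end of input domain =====

-- B replaces A's single append-with-conditional-insert loop by two phases — collect break
-- positions, then assemble the segments between them — same cost, different decomposition.

-- ===== PORT A =====
-- loop body of A's `for i in range(len(y))`
def stepA (x y : List (Option Int)) (threshold : Int)
    (st : List (Option Int) × List (Option Int)) (i : Int) :
    List (Option Int) × List (Option Int) :=
  let nx := st.1 ++ [PySem.List.pyGetD x i none]   -- x[i]  (Pre_ keeps i in range)
  let ny := st.2 ++ [PySem.List.pyGetD y i none]   -- y[i]
  if i < (y.length : Int) - 1 then
    match PySem.List.pyGetD y i none, PySem.List.pyGetD y (i + 1) none with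
    | some a, some b =>
        -- diff = abs(float(y[i+1]) - float(y[i])); exact on Int in Dom
        if threshold < |b - a| then (nx ++ [none], ny ++ [none]) else (nx, ny)
    | _, _ => (nx, ny)
  else (nx, ny)

def insert_breaks_py (x : List (Option Int)) (y : List (Option Int)) (threshold : Int) :
    List (Option Int) × List (Option Int) :=
  (PySem.List.pyRange 0 (y.length : Int)).foldl (stepA x y threshold) ([], [])

-- ===== PORT B =====
-- the break condition of B's comprehension
def brkCond (y : List (Option Int)) (threshold : Int) (i : Int) : Bool :=
  match PySem.List.pyGetD y i none, PySem.List.pyGetD y (i + 1) none with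
  | some a, some b => threshold < |b - a|
  | _, _ => false

-- `[l[i] for i in range(s, e)]`
def seg (l : List (Option Int)) (s e : Int) : List (Option Int) :=
  (PySem.List.pyRange s e).map (fun i => PySem.List.pyGetD l i none)

-- loop body of B's `for b in breaks` (state: new_x, new_y, start)
def stepB (x y : List (Option Int))
    (st : List (Option Int) × List (Option Int) × Int) (b : Int) :
    List (Option Int) × List (Option Int) × Int :=
  (st.1 ++ seg x st.2.2 (b + 1) ++ [none], st.2.1 ++ seg y st.2.2 (b + 1) ++ [none], b + 1)

def insert_breaks_py_alt (x : List (Option Int)) (y : List (Option Int)) (threshold : Int) :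
    List (Option Int) × List (Option Int) :=
  let n : Int := y.length
  let breaks := (PySem.List.pyRange 0 (n - 1)).filter (brkCond y threshold)
  let st := breaks.foldl (stepB x y) ([], [], 0)
  (st.1 ++ seg x st.2.2 n, st.2.1 ++ seg y st.2.2 n)

-- ===== PRECONDITION & SPEC =====
-- Pre_ excludes len(y) > len(x), where Python A raises IndexError at x[i] (B raises there too).
def Pre_insert_breaks_py (x : List (Option Int)) (y : List (Option Int)) (threshold : Int) : Prop :=
  y.length ≤ x.length

instance (x : List (Option Int)) (y : List (Option Int)) (threshold : Int) : Decidable (Pre_insert_breaks_py x y threshold) := by unfold Pre_insert_breaks_py; infer_instance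

def pvWitness_insert_breaks_py : List (Option Int) × List (Option Int) × Int :=
  ([some 1, some 2, none, some 3], [some 0, some 300, none, some 5], 180)

def Spec_insert_breaks_py (x : List (Option Int)) (y : List (Option Int)) (threshold : Int) (out : List (Option Int) × List (Option Int)) : Prop := out = insert_breaks_py_alt x y threshold
instance (x : List (Option Int)) (y : List (Option Int)) (threshold : Int) (out : List (Option Int) × List (Option Int)) : Decidable (Spec_insert_breaks_py x y threshold out) := by unfold Spec_insert_breaks_py; infer_instance

-- ===== CLAIM (what is proved, stated in full; the proofs are below) =====
def Claim_equal_insert_breaks_py : Prop := ∀ (x : List (Option Int)) (y : List (Option Int)) (threshold : Int), Dom_insert_breaks_py x y threshold → Pre_insert_breaks_py x y threshold → Spec_insert_breaks_py x y threshold (insert_breaks_py x y threshold)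

-- ===== LEMMAS AND PROOFS =====

-- reference shape: points s..e-1 split by the break positions bs, a `none` after each break
def asm (l : List (Option Int)) : List Int → Int → Int → List (Option Int)
  | [], s, e => seg l s e
  | b :: bs, s, e => seg l s (b + 1) ++ none :: asm l bs (b + 1) e

theorem seg_empty (l : List (Option Int)) (s : Int) : seg l s s = [] := by
  simp [seg, PySem.List.pyRange]

theorem seg_snoc (l : List (Option Int)) {s e : Int} (h : s ≤ e) :
    seg l s (e + 1) = seg l s e ++ [PySem.List.pyGetD l e none] := by
  simp [seg, PySem.List.pyRange_one_succ_right h]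

theorem pyRange_pairwise (a b : Int) : (PySem.List.pyRange a b).Pairwise (· < ·) := by
  induction hn : (b - a).toNat generalizing a with
  | zero =>
    have : PySem.List.pyRange a b = [] := by simp [PySem.List.pyRange]; omega
    simp [this]
  | succ k ih =>
    rw [PySem.List.pyRange_one_cons (by omega)]
    refine List.Pairwise.cons ?_ (ih (a + 1) (by omega))
    intro x hx; exact lt_of_lt_of_le (by omega) (PySem.List.mem_pyRange_one.mp hx).1

theorem asm_snoc (l : List (Option Int)) (bs : List Int) (s e : Int) :
    asm l (bs ++ [e]) s (e + 1) = asm l bs s (e + 1) ++ [none] := by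
  induction bs generalizing s with
  | nil => simp [asm, seg_empty]
  | cons b bs ih => simp [asm, ih]

theorem asm_extend (l : List (Option Int)) (bs : List Int) (s e : Int)
    (hse : s ≤ e) (hp : bs.Pairwise (· < ·)) (hb : ∀ b ∈ bs, s ≤ b ∧ b < e) :
    asm l bs s (e + 1) = asm l bs s e ++ [PySem.List.pyGetD l e none] := by
  induction bs generalizing s with
  | nil => exact seg_snoc l hse
  | cons b bs ih =>
    have hbe := hb b (by simp)
    have := hp.of_cons
    rw [asm, asm, ih (b + 1) (by omega) hp.of_cons
      (fun b' hb' => ⟨by have := (List.pairwise_cons.mp hp).1 b' hb'; omega, (hb b' (by simp [hb'])).2⟩)]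
    simp

-- A's step, phrased through brkCond
theorem stepA_eq (x y : List (Option Int)) (threshold : Int)
    (st : List (Option Int) × List (Option Int)) (i : Int) :
    stepA x y threshold st i =
      if (decide (i < (y.length : Int) - 1) && brkCond y threshold i) = true then
        (st.1 ++ [PySem.List.pyGetD x i none, none], st.2 ++ [PySem.List.pyGetD y i none, none])
      else
        (st.1 ++ [PySem.List.pyGetD x i none], st.2 ++ [PySem.List.pyGetD y i none]) := by
  unfold stepA brkCond
  rcases PySem.List.pyGetD y i none with _ | a <;>
    rcases PySem.List.pyGetD y (i + 1) none with _ | b <;>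
      split_ifs with h1 h2 <;> simp_all <;> omega

-- A's partial loop equals the assembled segments for the breaks seen so far
theorem A_partial (x y : List (Option Int)) (threshold : Int) (k : Nat)
    (hk : (k : Int) ≤ (y.length : Int)) :
    (PySem.List.pyRange 0 (k : Int)).foldl (stepA x y threshold) ([], []) =
      (asm x (((PySem.List.pyRange 0 (k : Int)).filter
          (fun i => decide (i < (y.length : Int) - 1) && brkCond y threshold i))) 0 (k : Int),
       asm y (((PySem.List.pyRange 0 (k : Int)).filter
          (fun i => decide (i < (y.length : Int) - 1) && brkCond y threshold i))) 0 (k : Int)) := by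
  induction k with
  | zero =>
    have h0 : PySem.List.pyRange 0 (0 : Int) = [] := by decide
    simp [h0, asm, seg_empty]
  | succ k ih =>
    have hcast : ((k + 1 : Nat) : Int) = (k : Int) + 1 := by push_cast; ring
    rw [hcast, PySem.List.pyRange_one_succ_right (by positivity), List.foldl_append,
      List.filter_append, ih (by omega)]
    set bs := (PySem.List.pyRange 0 (k : Int)).filter
        (fun i => decide (i < (y.length : Int) - 1) && brkCond y threshold i) with hbs
    have hp : bs.Pairwise (· < ·) := (pyRange_pairwise 0 (k : Int)).filter _
    have hmem : ∀ b ∈ bs, (0 : Int) ≤ b ∧ b < (k : Int) := by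
      intro b hb
      exact PySem.List.mem_pyRange_one.mp (List.mem_of_mem_filter hb)
    simp only [List.foldl_cons, List.foldl_nil, List.filter_cons, List.filter_nil]
    rw [stepA_eq]
    by_cases hc : (decide ((k : Int) < (y.length : Int) - 1) && brkCond y threshold (k : Int)) = true
    · rw [if_pos hc, if_pos hc, asm_snoc, asm_snoc,
        asm_extend x bs 0 (k : Int) (by positivity) hp hmem,
        asm_extend y bs 0 (k : Int) (by positivity) hp hmem]
      simp
    · rw [if_neg hc, if_neg hc, List.append_nil,
        asm_extend x bs 0 (k : Int) (by positivity) hp hmem,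
        asm_extend y bs 0 (k : Int) (by positivity) hp hmem]

-- B's loop over the break list assembles the same segments
theorem B_fold (x y : List (Option Int)) (bs : List Int)
    (ax ay : List (Option Int)) (s e : Int) :
    (let st := bs.foldl (stepB x y) (ax, ay, s)
     (st.1 ++ seg x st.2.2 e, st.2.1 ++ seg y st.2.2 e)) =
      (ax ++ asm x bs s e, ay ++ asm y bs s e) := by
  induction bs generalizing ax ay s with
  | nil => simp [asm]
  | cons b bs ih =>
    simp only [List.foldl_cons, stepB]
    rw [ih]
    simp [asm, List.append_assoc]

-- the conjunct `i < n-1` in A's filtered range is absorbed into the range bound n-1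
theorem filter_range_absorb (y : List (Option Int)) (threshold : Int) :
    ((PySem.List.pyRange 0 (y.length : Int)).filter
        (fun i => decide (i < (y.length : Int) - 1) && brkCond y threshold i)) =
      (PySem.List.pyRange 0 ((y.length : Int) - 1)).filter (brkCond y threshold) := by
  rcases Nat.eq_zero_or_pos y.length with h | h
  · have h1 : PySem.List.pyRange (0 : Int) ((0 : Nat) : Int) = [] := by decide
    have h2 : PySem.List.pyRange (0 : Int) (((0 : Nat) : Int) - 1) = [] := by decide
    rw [h, h1, h2]; rfl
  · obtain ⟨m, hm⟩ : ∃ m : Nat, y.length = m + 1 := ⟨y.length - 1, by omega⟩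
    have hc : (y.length : Int) = (m : Int) + 1 := by rw [hm]; push_cast; ring
    have hs : (m : Int) + 1 - 1 = (m : Int) := by ring
    rw [hc, hs, PySem.List.pyRange_one_succ_right (by positivity), List.filter_append]
    simp only [List.filter_cons, List.filter_nil]
    rw [if_neg (by simp), List.append_nil, List.filter_congr]
    intro i hi
    have := PySem.List.mem_pyRange_one.mp hi
    simp [this.2]

-- ===== VERDICT (by name: the statement is the Claim_ definition above) =====
theorem insert_breaks_py_spec : Claim_equal_insert_breaks_py := by
  intro x y threshold _ _
  unfold Spec_insert_breaks_py insert_breaks_py insert_breaks_py_alt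
  rw [show ((y.length : Int)) = ((y.length : Nat) : Int) from rfl,
    A_partial x y threshold y.length le_rfl, filter_range_absorb]
  rw [B_fold x y _ [] [] 0 (y.length : Int)]
  simp
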